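-- pv_equiv track=rewrite | github.com/GwendolynYang/survival_api | cleaner/views.py | get_eventMonth
-- ===== SOURCE A (Python) =====
-- def get_eventMonth(priceHistory):
--     mList, mSold = 0, 0
--     for row in priceHistory:
--         if row[2] == 'Listed For Sale':
--             mList = int(row[0][:2])
--             break
--         elif row[2] == 'Sold':
--             mSold = int(row[0][:2])
--     return mList, mSold
-- ===== SOURCE B (Python) =====
-- def get_eventMonth(priceHistory):
--     n = len(priceHistory)
--     i = next((k for k, row in enumerate(priceHistory) if row[2] == 'Listed For Sale'), n)
--     mList = int(priceHistory[i][0][:2]) if i < n else 0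
--     mSold = 0
--     for row in reversed(priceHistory[:i]):
--         if row[2] == 'Sold':
--             mSold = int(row[0][:2])
--             break
--     return mList, mSold
-- ===== Notes on version B (the rewrite author's own statement) =====
-- stated objective: alternative
-- what changed: A's single accumulating pass (overwriting mSold until it breaks) is replaced by locating the cutoff index of the first 'Listed For Sale' row and then searching the prefix in reverse for the first 'Sold' row, so no accumulator is carried.
import Mathlib
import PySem

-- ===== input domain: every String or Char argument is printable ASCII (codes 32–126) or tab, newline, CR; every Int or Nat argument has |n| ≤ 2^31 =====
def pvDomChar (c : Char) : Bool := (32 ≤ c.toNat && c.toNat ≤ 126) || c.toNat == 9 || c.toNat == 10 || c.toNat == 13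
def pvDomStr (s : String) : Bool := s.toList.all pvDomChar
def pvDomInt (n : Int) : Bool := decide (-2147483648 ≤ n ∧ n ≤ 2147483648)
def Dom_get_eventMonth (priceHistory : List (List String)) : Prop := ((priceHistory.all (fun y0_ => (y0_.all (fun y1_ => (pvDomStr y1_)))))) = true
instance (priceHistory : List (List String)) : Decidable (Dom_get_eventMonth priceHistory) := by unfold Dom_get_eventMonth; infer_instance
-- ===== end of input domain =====

-- B replaces A's accumulating pass by a cutoff-index search plus a reverse scan of the prefix (alternative decomposition, same cost);
-- equivalence is about the return value only (neither version mutates its argument).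

-- row[2], total form (Python raises on short rows; Pre_ excludes those)
def pvTag (row : List String) : String := (PySem.List.pyGet? row 2).getD ""
-- int(row[0][:2]), total form (Pre_ excludes rows where Python's int() raises)
def pvMonth (row : List String) : Int :=
  (PySem.Int.ofStr? (PySem.Str.slice ((PySem.List.pyGet? row 0).getD "") none (some 2))).getD 0

-- ===== PORT A =====
def pvGoA : List (List String) → Int → Int → Int × Int
  | [], mList, mSold => (mList, mSold)
  | row :: rest, mList, mSold =>
    if pvTag row = "Listed For Sale" then (pvMonth row, mSold)
    else if pvTag row = "Sold" then pvGoA rest mList (pvMonth row)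
    else pvGoA rest mList mSold

def get_eventMonth (priceHistory : List (List String)) : Int × Int :=
  pvGoA priceHistory 0 0

-- ===== PORT B =====
-- index of the first 'Listed For Sale' row (length of the list if none)
def pvFindListed : List (List String) → Nat
  | [] => 0
  | row :: rest => if pvTag row = "Listed For Sale" then 0 else pvFindListed rest + 1

-- first 'Sold' row of the (reversed) prefix
def pvSoldScan : List (List String) → Int
  | [] => 0
  | row :: rest => if pvTag row = "Sold" then pvMonth row else pvSoldScan rest

def get_eventMonth_alt (priceHistory : List (List String)) : Int × Int :=
  let i := pvFindListed priceHistory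
  let mList := if i < priceHistory.length then pvMonth (priceHistory.getD i []) else 0
  let mSold := pvSoldScan ((PySem.List.slice priceHistory none (some (i : Int))).reverse)
  (mList, mSold)

-- ===== PRECONDITION & SPEC =====
-- a row A examines must have a third entry, and when its tag makes A call int(row[0][:2]) that call must not raise
def pvRowOK (row : List String) : Prop :=
  3 ≤ row.length ∧
  ((pvTag row = "Sold" ∨ pvTag row = "Listed For Sale") →
    (PySem.Int.ofStr? (PySem.Str.slice ((PySem.List.pyGet? row 0).getD "") none (some 2))).isSome = true)

-- Pre_ holds exactly when Python A returns: every row up to and including the first 'Listed For Sale' row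
-- (i.e. every row i with no earlier listing) is long enough and its int() parses; rows after the break are unconstrained.
def Pre_get_eventMonth (priceHistory : List (List String)) : Prop :=
  ∀ i < priceHistory.length,
    (∀ j < i, pvTag (priceHistory.getD j []) ≠ "Listed For Sale") →
    pvRowOK (priceHistory.getD i [])
instance (priceHistory : List (List String)) : Decidable (Pre_get_eventMonth priceHistory) := by
  unfold Pre_get_eventMonth pvRowOK; infer_instance

def pvWitness_get_eventMonth : List (List String) :=
  [["07xx", "p", "Sold"], ["081", "q", "Listed For Sale"], []]

def Spec_get_eventMonth (priceHistory : List (List String)) (out : Int × Int) : Prop := out = get_eventMonth_alt priceHistory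
instance (priceHistory : List (List String)) (out : Int × Int) : Decidable (Spec_get_eventMonth priceHistory out) := by unfold Spec_get_eventMonth; infer_instance

-- ===== CLAIM (what is proved, stated in full; the proofs are below) =====
def Claim_equal_get_eventMonth : Prop := ∀ (priceHistory : List (List String)), Dom_get_eventMonth priceHistory → Pre_get_eventMonth priceHistory → Spec_get_eventMonth priceHistory (get_eventMonth priceHistory)

-- ===== LEMMAS AND PROOFS =====

-- proof-only accumulator form of pvSoldScan
def pvSoldScanD : List (List String) → Int → Int
  | [], s => s
  | row :: rest, s => if pvTag row = "Sold" then pvMonth row else pvSoldScanD rest s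

theorem pvSoldScanD_zero (l : List (List String)) : pvSoldScanD l 0 = pvSoldScan l := by
  induction l with
  | nil => rfl
  | cons row rest ih => simp [pvSoldScanD, pvSoldScan, ih]

theorem pvSoldScanD_append (xs : List (List String)) (row : List String) (s : Int) :
    pvSoldScanD (xs ++ [row]) s = pvSoldScanD xs (if pvTag row = "Sold" then pvMonth row else s) := by
  induction xs with
  | nil => rfl
  | cons r rest ih => simp only [List.cons_append, pvSoldScanD, ih]

theorem pvGoA_eq (l : List (List String)) (mL s : Int) :
    pvGoA l mL s =
      ((if pvFindListed l < l.length then pvMonth (l.getD (pvFindListed l) []) else mL),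
       pvSoldScanD ((l.take (pvFindListed l)).reverse) s) := by
  induction l generalizing s with
  | nil => simp [pvGoA, pvFindListed, pvSoldScanD]
  | cons row rest ih =>
    by_cases hL : pvTag row = "Listed For Sale"
    · simp [pvGoA, pvFindListed, hL, pvSoldScanD]
    · by_cases hS : pvTag row = "Sold"
      · simp [pvGoA, pvFindListed, hL, hS, ih, pvSoldScanD_append, Nat.succ_lt_succ_iff]
      · simp [pvGoA, pvFindListed, hL, hS, ih, pvSoldScanD_append, Nat.succ_lt_succ_iff]

-- ===== VERDICT (by name: the statement is the Claim_ definition above) =====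
theorem get_eventMonth_spec : Claim_equal_get_eventMonth := by
  intro ph _ _
  unfold Spec_get_eventMonth get_eventMonth
  rw [pvGoA_eq, pvSoldScanD_zero]
  simp [get_eventMonth_alt, PySem.List.slice_to_natCast]
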